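-- pv_equiv track=rewrite | github.com/joshanashakya/dissertation | workspace/dataset/java-python/GeeksForGeeks/1003/A/2.py | Largercount
-- ===== SOURCE A (Python) =====
-- def Largercount(arr1, arr2, m, n):
--
--     count = 0
--
--     # map to store frequency of
--     # elements present in arr1
--     mp=dict()
--
--     # frequency of elements of arr1
--     # is calulated
--     for i in range(m):
--         mp[arr1[i]] = mp.get(arr1[i], 0) + 1
--
--     # check if the elements of arr2
--     # is present in arr2 or not
--     for i in range(n):
--         if (arr2[i] in mp.keys() and
--                        mp[arr2[i]] != 0):
--             mp[arr2[i]] -= 1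
--
--     # count the elements of arr1 whose
--     # frequency is more than arr2
--     for i in range(m):
--         if (mp[arr1[i]] != 0):
--             count += 1
--             mp[arr1[i]] = 0
--
--     return count
-- ===== SOURCE B (Python) =====
-- def Largercount(arr1, arr2, m, n):
--     # frequency tables of the first m / n elements
--     c1 = {}
--     for x in arr1[:max(m, 0)]:
--         c1[x] = c1.get(x, 0) + 1
--     c2 = {}
--     for x in arr2[:max(n, 0)]:
--         c2[x] = c2.get(x, 0) + 1
--     # count distinct values of arr1[:m] left with surplus frequency
--     return sum(1 for k, v in c1.items() if v > c2.get(k, 0))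
-- ===== Notes on version B (the rewrite author's own statement) =====
-- stated objective: simpler
-- what changed: Replaces A's single mutated dict (build, in-place decrement loop over arr2, then a zero-out dedup pass over arr1) with two independent frequency tables built from the m/n slices and one comparison pass over c1's distinct keys.
import Mathlib
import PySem

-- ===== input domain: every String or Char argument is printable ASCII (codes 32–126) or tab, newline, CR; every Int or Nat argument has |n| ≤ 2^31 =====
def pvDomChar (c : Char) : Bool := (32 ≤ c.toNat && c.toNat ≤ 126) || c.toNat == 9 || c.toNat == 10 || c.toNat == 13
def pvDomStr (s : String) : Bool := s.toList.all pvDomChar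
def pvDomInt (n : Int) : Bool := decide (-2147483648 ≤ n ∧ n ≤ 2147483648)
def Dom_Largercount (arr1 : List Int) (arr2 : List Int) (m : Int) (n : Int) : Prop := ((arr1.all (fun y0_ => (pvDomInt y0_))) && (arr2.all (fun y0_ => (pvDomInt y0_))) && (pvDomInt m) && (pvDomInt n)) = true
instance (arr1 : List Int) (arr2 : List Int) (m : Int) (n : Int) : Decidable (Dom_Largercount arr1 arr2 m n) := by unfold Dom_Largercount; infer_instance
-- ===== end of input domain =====

-- ===== PORT A =====
-- B replaces A's single mutated dict (decrement loop + zero-out dedup pass) with two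
-- frequency tables and one comparison pass over distinct keys; same cost, simpler.
def Largercount (arr1 : List Int) (arr2 : List Int) (m : Int) (n : Int) : Int :=
  let mp : PySem.Dict Int Int :=
    (PySem.List.pyRange 0 m 1).foldl
      (fun mp i => mp.insert (PySem.List.pyGetD arr1 i 0)
        (mp.getD (PySem.List.pyGetD arr1 i 0) 0 + 1)) PySem.Dict.empty
  let mp :=
    (PySem.List.pyRange 0 n 1).foldl
      (fun mp i =>
        if mp.contains (PySem.List.pyGetD arr2 i 0) &&
           (mp.getD (PySem.List.pyGetD arr2 i 0) 0 != 0) then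
          mp.insert (PySem.List.pyGetD arr2 i 0)
            (mp.getD (PySem.List.pyGetD arr2 i 0) 0 - 1)
        else mp) mp
  let r :=
    (PySem.List.pyRange 0 m 1).foldl
      (fun (p : Int × PySem.Dict Int Int) i =>
        if p.2.getD (PySem.List.pyGetD arr1 i 0) 0 != 0 then
          (p.1 + 1, p.2.insert (PySem.List.pyGetD arr1 i 0) 0)
        else p) (0, mp)
  r.1

-- ===== PORT B =====
def Largercount_alt (arr1 : List Int) (arr2 : List Int) (m : Int) (n : Int) : Int :=
  let c1 : PySem.Dict Int Int :=
    (PySem.List.slice arr1 none (some (max m 0))).foldl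
      (fun d x => d.insert x (d.getD x 0 + 1)) PySem.Dict.empty
  let c2 : PySem.Dict Int Int :=
    (PySem.List.slice arr2 none (some (max n 0))).foldl
      (fun d x => d.insert x (d.getD x 0 + 1)) PySem.Dict.empty
  c1.items.foldl (fun acc kv => if kv.2 > c2.getD kv.1 0 then acc + 1 else acc) 0

-- ===== PRECONDITION & SPEC =====
-- Pre_ excludes exactly the inputs where A raises IndexError: m or n exceeding the list lengths.
def Pre_Largercount (arr1 : List Int) (arr2 : List Int) (m : Int) (n : Int) : Prop :=
  m ≤ (arr1.length : Int) ∧ n ≤ (arr2.length : Int)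
instance (arr1 : List Int) (arr2 : List Int) (m : Int) (n : Int) : Decidable (Pre_Largercount arr1 arr2 m n) := by unfold Pre_Largercount; infer_instance
def pvWitness_Largercount : List Int × List Int × Int × Int := ([1, 2, 1, 3], [1, 3, 3], 4, 3)
def Spec_Largercount (arr1 : List Int) (arr2 : List Int) (m : Int) (n : Int) (out : Int) : Prop := out = Largercount_alt arr1 arr2 m n
instance (arr1 : List Int) (arr2 : List Int) (m : Int) (n : Int) (out : Int) : Decidable (Spec_Largercount arr1 arr2 m n out) := by unfold Spec_Largercount; infer_instance

-- ===== CLAIM (what is proved, stated in full; the proofs are below) =====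
def Claim_equal_Largercount : Prop := ∀ (arr1 : List Int) (arr2 : List Int) (m : Int) (n : Int), Dom_Largercount arr1 arr2 m n → Pre_Largercount arr1 arr2 m n → Spec_Largercount arr1 arr2 m n (Largercount arr1 arr2 m n)

-- ===== LEMMAS AND PROOFS =====

-- a fold of f over xs[i] for i in range(j) is the fold of f over the first j elements
theorem foldl_range_take {beta : Type} (f : beta → Int → beta) (xs : List Int) (j : Nat)
    (hj : j ≤ xs.length) (init : beta) :
    (PySem.List.pyRange 0 (j : Int) 1).foldl
        (fun acc i => f acc (PySem.List.pyGetD xs i 0)) init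
      = (xs.take j).foldl f init := by
  induction j generalizing init with
  | zero => simp [PySem.List.pyRange_one_eq_nil]
  | succ j ih =>
    have hc : ((j + 1 : Nat) : Int) = (j : Int) + 1 := by push_cast; ring
    rw [hc, PySem.List.pyRange_one_succ_right (by positivity), List.foldl_append]
    have hjlt : j < xs.length := by omega
    rw [List.take_add_one, List.foldl_append, ih (by omega)]
    simp [List.getElem?_eq_getElem hjlt, List.getD, PySem.List.pyGetD_natCast]

-- a counting fold 'if p x then acc+1 else acc' is countP
theorem foldl_count_if' {α : Type} (p : α → Prop) [DecidablePred p] (l : List α) (c : Int) :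
    l.foldl (fun acc x => if p x then acc + 1 else acc) c = c + (l.countP (fun x => decide (p x)) : Int) := by
  induction l generalizing c with
  | nil => simp
  | cons x rest ih =>
    simp only [List.foldl_cons]
    by_cases hx : p x
    · rw [if_pos hx, ih, List.countP_cons_of_pos (pa := by simpa using hx)]; push_cast; ring
    · rw [if_neg hx, ih, List.countP_cons_of_neg (pa := by simpa using hx)]

-- A's decrement loop leaves max(old - count, 0) at every key, given nonnegative values
theorem decr_getD (l : List Int) (d : PySem.Dict Int Int) (k : Int)
    (hpos : ∀ j, 0 ≤ d.getD j 0) :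
    (l.foldl (fun d x =>
        if d.contains x && (d.getD x 0 != 0) then d.insert x (d.getD x 0 - 1) else d) d).getD k 0
      = max (d.getD k 0 - (l.count k : Int)) 0 := by
  induction l generalizing d with
  | nil => simpa using (max_eq_left (hpos k)).symm
  | cons x rest ih =>
    simp only [List.foldl_cons]
    have hstep : ∀ j, 0 ≤ (if d.contains x && (d.getD x 0 != 0) then d.insert x (d.getD x 0 - 1) else d).getD j 0 := by
      intro j
      split_ifs with h
      · rw [PySem.Dict.getD_insert]
        split_ifs with hj
        · subst hj
          have := hpos j
          have hne : d.getD j 0 ≠ 0 := by simpa using (Bool.and_elim_right h)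
          omega
        · exact hpos j
      · exact hpos j
    rw [ih _ hstep]
    by_cases hk : x = k
    · subst hk
      rw [List.count_cons_self]
      by_cases hz : d.getD x 0 = 0
      · have hcond : (d.contains x && (d.getD x 0 != 0)) = false := by simp [hz]
        simp only [hcond, Bool.false_eq_true, if_false]
        push_cast
        omega
      · have hcont : d.contains x = true := by
          by_contra hc
          have : d.getD x 0 = 0 := PySem.Dict.getD_of_not_contains d (0:Int) (by simpa using hc)
          exact hz this
        have hcond : (d.contains x && (d.getD x 0 != 0)) = true := by simp [hcont, hz]
        simp only [hcond, if_true, PySem.Dict.getD_insert_self]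
        push_cast
        omega
    · have hcnt : List.count k (x :: rest) = List.count k rest := by
        simp [hk]
      rw [hcnt]
      split_ifs with h
      · rw [PySem.Dict.getD_insert, if_neg (fun h => hk h.symm)]
      · rfl

-- A's zero-out counting loop counts the distinct elements of l whose value in d is nonzero
theorem third_count (l : List Int) (d : PySem.Dict Int Int) (c : Int) :
    (l.foldl (fun (p : Int × PySem.Dict Int Int) x =>
        if p.2.getD x 0 != 0 then (p.1 + 1, p.2.insert x 0) else p) (c, d)).1
      = c + ((PySem.Set.ofList l).countP (fun k => d.getD k 0 != 0) : Int) := by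
  induction l generalizing d c with
  | nil => simp [PySem.Set.ofList_nil]
  | cons x rest ih =>
    simp only [List.foldl_cons]
    rw [PySem.Set.ofList_cons]
    have hdisc : PySem.Set.discard (PySem.Set.ofList rest) x
        = (PySem.Set.ofList rest).filter (fun y => !(y == x)) := by
      simp [PySem.Set.discard]
    by_cases hx : d.getD x 0 = 0
    · rw [if_neg (by simp [hx])]
      rw [ih d c]
      rw [List.countP_cons_of_neg (pa := by simp [hx])]
      rw [hdisc, List.countP_filter]
      have : List.countP (fun k => d.getD k 0 != 0) (PySem.Set.ofList rest)
          = List.countP (fun a => (d.getD a 0 != 0) && !(a == x)) (PySem.Set.ofList rest) := by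
        refine List.countP_congr ?_
        intro a _
        by_cases ha : a = x
        · subst ha; simp [hx]
        · simp [ha]
      rw [this]
    · rw [if_pos (by simpa using hx)]
      rw [ih _ (c + 1)]
      rw [List.countP_cons_of_pos (pa := by simpa using hx)]
      rw [hdisc, List.countP_filter]
      have hpred : (fun k => ((d.insert x 0).getD k 0 != 0))
          = (fun a => (d.getD a 0 != 0) && !(a == x)) := by
        funext a
        by_cases ha : a = x
        · subst ha; simp [PySem.Dict.getD_insert_self]
        · rw [PySem.Dict.getD_insert, if_neg ha]; simp [ha]
      rw [hpred]
      push_cast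
      ring

-- ===== VERDICT (by name: the statement is the Claim_ definition above) =====
theorem Largercount_spec : Claim_equal_Largercount := by
  intro arr1 arr2 m n _ hpre
  obtain ⟨hm, hn⟩ := hpre
  unfold Spec_Largercount
  simp only [Largercount, Largercount_alt]
  have hmt : m.toNat ≤ arr1.length := by omega
  have hnt : n.toNat ≤ arr2.length := by omega
  -- normalize ranges to Nat bounds and slices to 'take'
  have hr1 : PySem.List.pyRange 0 m 1 = PySem.List.pyRange 0 ((m.toNat : Nat) : Int) 1 := by
    by_cases h : 0 ≤ m
    · rw [Int.toNat_of_nonneg h]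
    · rw [PySem.List.pyRange_one_eq_nil (by omega), PySem.List.pyRange_one_eq_nil (by omega)]
  have hr2 : PySem.List.pyRange 0 n 1 = PySem.List.pyRange 0 ((n.toNat : Nat) : Int) 1 := by
    by_cases h : 0 ≤ n
    · rw [Int.toNat_of_nonneg h]
    · rw [PySem.List.pyRange_one_eq_nil (by omega), PySem.List.pyRange_one_eq_nil (by omega)]
  have hs1 : PySem.List.slice arr1 none (some (max m 0)) = arr1.take m.toNat := by
    rw [← Int.ofNat_toNat, PySem.List.slice_to_natCast]
  have hs2 : PySem.List.slice arr2 none (some (max n 0)) = arr2.take n.toNat := by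
    rw [← Int.ofNat_toNat, PySem.List.slice_to_natCast]
  rw [hr1, hr2, hs1, hs2]
  set l1 := arr1.take m.toNat with hl1
  set l2 := arr2.take n.toNat with hl2
  -- A's three index loops become folds over l1 / l2
  have e1 := foldl_range_take (fun (d : PySem.Dict Int Int) (x : Int) =>
      d.insert x (d.getD x 0 + 1)) arr1 m.toNat hmt PySem.Dict.empty
  simp only at e1
  rw [e1, PySem.Dict.foldl_insert_getD_add_one_eq_counter]
  have e2 := foldl_range_take (fun (d : PySem.Dict Int Int) (x : Int) =>
      if d.contains x && (d.getD x 0 != 0) then d.insert x (d.getD x 0 - 1) else d)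
      arr2 n.toNat hnt (PySem.Dict.counter l1)
  simp only at e2
  rw [e2]
  set mp2 := l2.foldl (fun d x =>
      if d.contains x && (d.getD x 0 != 0) then d.insert x (d.getD x 0 - 1) else d)
      (PySem.Dict.counter l1) with hmp2
  have e3 := foldl_range_take (fun (p : Int × PySem.Dict Int Int) (x : Int) =>
      if p.2.getD x 0 != 0 then (p.1 + 1, p.2.insert x 0) else p) arr1 m.toNat hmt ((0 : Int), mp2)
  simp only at e3
  rw [e3, third_count l1 mp2 0]
  -- B's side: both builds are counters; the items fold is a countP over distinct keys
  rw [PySem.Dict.foldl_insert_getD_add_one_eq_counter l2]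
  simp only [PySem.Dict.items_counter, List.foldl_map, gt_iff_lt]
  rw [foldl_count_if']
  rw [zero_add, zero_add]
  -- both sides are countP over the distinct elements of l1; the predicates agree
  congr 1
  refine List.countP_congr ?_
  intro k _
  have hpos : ∀ j, 0 ≤ (PySem.Dict.counter l1).getD j 0 := by
    intro j
    rw [PySem.Dict.getD_counter]
    exact Int.natCast_nonneg _
  rw [hmp2, decr_getD l2 (PySem.Dict.counter l1) k hpos, PySem.Dict.getD_counter,
      PySem.Dict.getD_counter]
  rw [Bool.eq_iff_iff]
  simp only [bne_iff_ne, ne_eq, decide_eq_true_eq, iff_true]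
  simp only [← hl1]
  omega
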